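-- pv_equiv track=rewrite | github.com/azmsu/twitter-sentiment | buildarff.py | feat5
-- ===== SOURCE A (Python) =====
-- def feat5(tweet):
--     '''
--     finds number of past-tense verbs in tweet
--     :param tweet: string containing tweet
--     :return: number of past-tense verbs in tweet
--     '''
--     count = 0
--     tweet = tweet.lower()
--     for token in tweet.split():
--         index = token.rfind('/')
--         if token[index + 1:] in ['vbd', 'vbn']:
--             count += 1
--     return count
-- ===== SOURCE B (Python) =====
-- def feat5(tweet):
--     """Single character-scan state machine: track only the current token's
--     suffix after the last '/', counting at token boundaries."""
--     count = 0
--     suf = []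
--     for ch in tweet.lower():
--         if ch.isspace():
--             if ''.join(suf) in ('vbd', 'vbn'):
--                 count += 1
--             suf = []
--         elif ch == '/':
--             suf = []
--         else:
--             suf.append(ch)
--     if ''.join(suf) in ('vbd', 'vbn'):
--         count += 1
--     return count
-- ===== Notes on version B (the rewrite author's own statement) =====
-- stated objective: alternative
-- what changed: Replaced the split-into-tokens loop with per-token rfind/slice by a single left-to-right character scan that maintains only the current token's suffix after its most recent slash, counting at token boundaries.
import Mathlib
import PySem

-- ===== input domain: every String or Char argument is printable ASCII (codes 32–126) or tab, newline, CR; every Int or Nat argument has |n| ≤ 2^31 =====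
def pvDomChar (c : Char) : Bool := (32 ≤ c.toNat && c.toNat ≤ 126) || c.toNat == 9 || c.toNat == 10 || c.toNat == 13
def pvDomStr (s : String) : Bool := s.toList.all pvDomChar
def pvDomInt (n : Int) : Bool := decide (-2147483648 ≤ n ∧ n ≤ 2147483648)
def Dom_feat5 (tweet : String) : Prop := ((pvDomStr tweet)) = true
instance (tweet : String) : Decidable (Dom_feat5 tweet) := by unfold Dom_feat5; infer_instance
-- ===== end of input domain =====

-- B replaces A's split/rfind/slice token loop by a single character-scan state machine (alternative decomposition, same cost).

-- ===== PORT A =====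
-- literal port of: count = 0; tweet = tweet.lower(); for token in tweet.split():
--   index = token.rfind('/'); if token[index+1:] in ['vbd','vbn']: count += 1; return count
def feat5 (tweet : String) : Int :=
  let tweet' := PySem.Str.lower tweet
  (PySem.Str.split₀ tweet').foldl
    (fun count token =>
      let index := PySem.Str.rfind token "/"
      if (["vbd", "vbn"] : List String).contains (PySem.Str.slice token (some (index + 1)) none) then
        count + 1
      else count)
    0

-- ===== PORT B =====
-- ''.join(suf) in ('vbd','vbn')  (suf is a list of single chars, so the join/compare is list equality)
def feat5Chk (suf : List Char) : Bool := suf == ['v', 'b', 'd'] || suf == ['v', 'b', 'n']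

-- one step of Source B's loop body on state (count, suf)
def feat5Step (st : Int × List Char) (ch : Char) : Int × List Char :=
  if PySem.Chars.isspace ch then
    ((if feat5Chk st.2 then st.1 + 1 else st.1), [])
  else if ch == '/' then (st.1, [])
  else (st.1, st.2 ++ [ch])

def feat5_alt (tweet : String) : Int :=
  let fin := (PySem.Str.lower tweet).toList.foldl feat5Step (0, [])
  if feat5Chk fin.2 then fin.1 + 1 else fin.1

-- ===== PRECONDITION & SPEC =====
def Spec_feat5 (tweet : String) (out : Int) : Prop := out = feat5_alt tweet
instance (tweet : String) (out : Int) : Decidable (Spec_feat5 tweet out) := by unfold Spec_feat5; infer_instance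

-- ===== CLAIM (what is proved, stated in full; the proofs are below) =====
def Claim_equal_feat5 : Prop := ∀ (tweet : String), Dom_feat5 tweet → Spec_feat5 tweet (feat5 tweet)

-- ===== LEMMAS AND PROOFS =====

-- suffix of a token after its last '/' (whole token if no '/'), as Source B accumulates it
def sufA (xs : List Char) : List Char :=
  xs.foldl (fun s c => if c == '/' then [] else s ++ [c]) []

-- A's per-token loop body, named for the proofs (definitionally A's lambda)
def aStep (count : Int) (token : String) : Int :=
  let index := PySem.Str.rfind token "/"
  if (["vbd", "vbn"] : List String).contains (PySem.Str.slice token (some (index + 1)) none) then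
    count + 1
  else count

theorem sufA_append (xs : List Char) (c : Char) :
    sufA (xs ++ [c]) = if c == '/' then [] else sufA xs ++ [c] := by
  simp [sufA, List.foldl_append]

theorem rfind_go_bounds (s sub : List Char) (k : Nat) :
    -1 ≤ PySem.Chars.rfind.go s sub k ∧ PySem.Chars.rfind.go s sub k ≤ (k : Int) := by
  induction k with
  | zero => simp [PySem.Chars.rfind.go]; split <;> simp
  | succ j ih =>
    simp only [PySem.Chars.rfind.go]
    split
    · constructor <;> omega
    · exact ⟨ih.1, by omega⟩

theorem rfind_go_append (xs : List Char) (c : Char) (k : Nat) (hk : k < xs.length) :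
    PySem.Chars.rfind.go (xs ++ [c]) ['/'] k = PySem.Chars.rfind.go xs ['/'] k := by
  induction k with
  | zero =>
    cases xs with
    | nil => simp at hk
    | cons a t => simp [PySem.Chars.rfind.go, List.isPrefixOf]
  | succ j ih =>
    have h1 : List.drop (j + 1) (xs ++ [c]) = List.drop (j + 1) xs ++ [c] :=
      List.drop_append_of_le_length (by omega)
    have h2 : List.drop (j + 1) xs ≠ [] := by
      intro h
      have := List.length_drop (l := xs) (i := j + 1)
      rw [h] at this
      simp at this
      omega
    obtain ⟨a, t, ht⟩ := List.exists_cons_of_ne_nil h2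
    simp only [PySem.Chars.rfind.go, h1, ht, List.cons_append, List.isPrefixOf, Bool.and_true]
    split
    · rfl
    · exact ih (by omega)

theorem rfind_slash_lt (xs : List Char) : PySem.Chars.rfind xs ['/'] < (xs.length : Int) := by
  cases xs with
  | nil => decide
  | cons a t =>
    have hb := rfind_go_bounds (a :: t) ['/'] t.length
    have h0 : List.drop (t.length + 1) (a :: t) = [] := by
      apply List.drop_eq_nil_of_le; simp
    have h1 : PySem.Chars.rfind (a :: t) ['/'] = PySem.Chars.rfind.go (a :: t) ['/'] t.length := by
      simp only [PySem.Chars.rfind, List.length_cons]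
      rw [show t.length + 1 = (t.length).succ from rfl]
      simp only [PySem.Chars.rfind.go, h0]
      simp only [show (['/'].isPrefixOf ([] : List Char)) = false from rfl,
        Bool.false_eq_true, if_false]
    rw [h1]
    simp only [List.length_cons]
    omega

theorem rfind_append (xs : List Char) (c : Char) :
    PySem.Chars.rfind (xs ++ [c]) ['/'] =
      if c == '/' then (xs.length : Int) else PySem.Chars.rfind xs ['/'] := by
  have hpc : ∀ (a : Char) (l : List Char), (['/'].isPrefixOf (a :: l)) = ('/' == a) := by
    intro a l; simp [List.isPrefixOf]
  have hpn : (['/'].isPrefixOf ([] : List Char)) = false := rfl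
  cases xs with
  | nil =>
    simp only [List.nil_append, PySem.Chars.rfind, List.length_cons, List.length_nil, Nat.zero_add]
    simp only [PySem.Chars.rfind.go, List.drop_succ_cons, List.drop_nil, hpn, hpc,
      Bool.false_eq_true, if_false]
    by_cases hc : c = '/'
    · simp [hc]
    · simp [hc, Ne.symm hc]
  | cons a t =>
    set xs := a :: t with hxs
    have hx1 : 1 ≤ xs.length := by simp [hxs]
    have hlen : (xs ++ [c]).length = xs.length + 1 := by simp
    simp only [PySem.Chars.rfind, hlen]
    have h0 : List.drop (xs.length + 1) (xs ++ [c]) = [] := by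
      apply List.drop_eq_nil_of_le; simp
    rw [show xs.length + 1 = (xs.length).succ from rfl]
    simp only [PySem.Chars.rfind.go, h0, hpn, Bool.false_eq_true, if_false]
    have hx : xs.length = (xs.length - 1).succ := by omega
    rw [hx]
    simp only [PySem.Chars.rfind.go]
    have hd : List.drop (xs.length - 1 + 1) (xs ++ [c]) = [c] := by
      rw [List.drop_append_of_le_length (by omega)]
      have : List.drop (xs.length - 1 + 1) xs = [] := by
        apply List.drop_eq_nil_of_le; omega
      simp [this]
    have hdx : List.drop (xs.length - 1 + 1) xs = [] := by
      apply List.drop_eq_nil_of_le; omega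
    rw [hd, hdx]
    simp only [hpc, hpn, Bool.false_eq_true, if_false]
    by_cases hcc : c = '/'
    · simp only [hcc, beq_self_eq_true, if_true]
    · have hb1 : (('/' : Char) == c) = false := by simp [Ne.symm hcc]
      have hb2 : (c == '/') = false := by simp [hcc]
      rw [hb1, hb2]
      simp only [Bool.false_eq_true, if_false]
      exact rfind_go_append xs c (xs.length - 1) (by omega)

theorem slice_rfind_eq_sufA (tok : List Char) :
    PySem.Chars.slice tok (some (PySem.Chars.rfind tok ['/'] + 1)) none = sufA tok := by
  induction tok using List.reverseRecOn with
  | nil => decide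
  | append_singleton xs c ih =>
    rw [rfind_append, sufA_append]
    by_cases hc : c = '/'
    · simp only [hc, beq_self_eq_true, if_true]
      simp only [PySem.Chars.slice_eq_listSlice]
      rw [PySem.List.slice_from (xs ++ ['/']) (show (0:Int) ≤ (xs.length : Int) + 1 by omega)]
      apply List.drop_eq_nil_of_le
      simp
    · have hbc : (c == '/') = false := by simp [hc]
      rw [hbc]
      simp only [Bool.false_eq_true, if_false]
      have hrb : -1 ≤ PySem.Chars.rfind xs ['/'] ∧ PySem.Chars.rfind xs ['/'] ≤ (xs.length : Int) :=
        rfind_go_bounds xs ['/'] xs.length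
      obtain ⟨hr1, hr2⟩ := hrb
      have hlt := rfind_slash_lt xs
      simp only [PySem.Chars.slice_eq_listSlice] at ih ⊢
      rw [PySem.List.slice_from (xs ++ [c])
        (show (0:Int) ≤ PySem.Chars.rfind xs ['/'] + 1 by omega)]
      rw [PySem.List.slice_from xs
        (show (0:Int) ≤ PySem.Chars.rfind xs ['/'] + 1 by omega)] at ih
      rw [List.drop_append_of_le_length
        (Int.toNat_le.mpr (by omega : PySem.Chars.rfind xs ['/'] + 1 ≤ (xs.length : Int)))]
      rw [ih]

theorem ofList_beq (l : List Char) (s : String) : (String.ofList l == s) = (l == s.toList) := by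
  rw [Bool.eq_iff_iff]
  simp only [beq_iff_eq]
  constructor
  · intro h; rw [← h, String.toList_ofList]
  · intro h; rw [h, String.ofList_toList]

-- A's per-token test equals Source B's check of the tracked suffix
theorem token_test_eq (tok : List Char) :
    (["vbd", "vbn"] : List String).contains
      (PySem.Str.slice (String.ofList tok) (some (PySem.Str.rfind (String.ofList tok) "/" + 1)) none)
      = feat5Chk (sufA tok) := by
  have h1 : PySem.Str.rfind (String.ofList tok) "/" = PySem.Chars.rfind tok ['/'] := by
    simp [PySem.Str.rfind]
  have h3 := slice_rfind_eq_sufA tok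
  have h2 : PySem.Str.slice (String.ofList tok) (some (PySem.Chars.rfind tok ['/'] + 1)) none
      = String.ofList (sufA tok) := by
    simp only [PySem.Str.slice, String.toList_ofList]
    rw [h3]
  rw [h1, h2]
  have e1 : (String.ofList (sufA tok) == "vbd") = (sufA tok == ['v', 'b', 'd']) := by
    rw [ofList_beq, show "vbd".toList = ['v', 'b', 'd'] from by decide]
  have e2 : (String.ofList (sufA tok) == "vbn") = (sufA tok == ['v', 'b', 'n']) := by
    rw [ofList_beq, show "vbn".toList = ['v', 'b', 'n'] from by decide]
  simp only [List.contains, List.elem_cons, List.elem_nil, e1, e2, feat5Chk]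
  cases hb : (sufA tok == ['v', 'b', 'd']) <;> cases hn : (sufA tok == ['v', 'b', 'n']) <;> rfl

theorem aStep_eq (n : Int) (t : List Char) :
    aStep n (String.ofList t) = if feat5Chk (sufA t) then n + 1 else n := by
  have h0 : aStep n (String.ofList t)
      = if ((["vbd", "vbn"] : List String).contains
          (PySem.Str.slice (String.ofList t)
            (some (PySem.Str.rfind (String.ofList t) "/" + 1)) none)) then n + 1 else n := rfl
  rw [h0]
  simp only [token_test_eq]

theorem foldA_eq_countP (toks : List (List Char)) :
    ∀ (n : Int),
      (toks.map String.ofList).foldl aStep n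
        = n + ((toks.countP (fun tok => feat5Chk (sufA tok)) : Nat) : Int) := by
  induction toks with
  | nil => intro n; simp
  | cons t ts ih =>
    intro n
    simp only [List.map_cons, List.foldl_cons, aStep_eq]
    by_cases h : feat5Chk (sufA t)
    · rw [if_pos h, ih, List.countP_cons, if_pos h]
      push_cast
      ring
    · rw [if_neg h, ih, List.countP_cons, if_neg h]
      push_cast
      ring

-- split₀.go prepends its accumulator (reversed) to the tokens it still finds
theorem split_go_acc (cs : List Char) :
    ∀ (cur : List Char) (acc : List (List Char)),
      PySem.Chars.split₀.go cs cur acc = acc.reverse ++ PySem.Chars.split₀.go cs cur [] := by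
  induction cs with
  | nil =>
    intro cur acc
    simp only [PySem.Chars.split₀.go]
    split <;> simp
  | cons c rest ih =>
    intro cur acc
    simp only [PySem.Chars.split₀.go]
    split
    · split
      · exact ih [] acc
      · rw [ih [] (cur.reverse :: acc), ih [] [cur.reverse]]
        simp
    · exact ih (c :: cur) acc

-- the machine over the rest of the string, started on the suffix state of a partial token
theorem machine_eq_split (cs : List Char) :
    ∀ (cur : List Char) (count : Int),
      (if feat5Chk ((cs.foldl feat5Step (count, sufA cur.reverse)).2)
       then (cs.foldl feat5Step (count, sufA cur.reverse)).1 + 1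
       else (cs.foldl feat5Step (count, sufA cur.reverse)).1)
        = count + (((PySem.Chars.split₀.go cs cur []).countP
            (fun tok => feat5Chk (sufA tok)) : Nat) : Int) := by
  induction cs with
  | nil =>
    intro cur count
    simp only [List.foldl_nil, PySem.Chars.split₀.go]
    by_cases hc : cur = []
    · simp [hc, sufA, feat5Chk]
    · have he : cur.isEmpty = false := by simp [hc]
      simp only [he, Bool.false_eq_true, if_false, List.reverse_cons, List.reverse_nil,
        List.nil_append]
      by_cases h : feat5Chk (sufA cur.reverse)
      · rw [if_pos h]
        simp [h]
      · rw [if_neg h]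
        simp [h]
  | cons c rest ih =>
    intro cur count
    simp only [List.foldl_cons]
    by_cases hsp : PySem.Chars.isspace c
    · have hstep : feat5Step (count, sufA cur.reverse) c
          = ((if feat5Chk (sufA cur.reverse) then count + 1 else count), []) := by
        simp [feat5Step, hsp]
      rw [hstep]
      by_cases hc : cur = []
      · subst hc
        have hz : (if feat5Chk (sufA (([] : List Char).reverse)) then count + 1 else count)
            = count := rfl
        rw [hz]
        have h4 := ih [] count
        rw [show sufA (([] : List Char).reverse) = ([] : List Char) from rfl] at h4
        have hgo : PySem.Chars.split₀.go (c :: rest) [] []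
            = PySem.Chars.split₀.go rest [] [] := by
          simp [PySem.Chars.split₀.go, hsp]
        rw [hgo]
        exact h4
      · have he : cur.isEmpty = false := by simp [hc]
        have hgo : PySem.Chars.split₀.go (c :: rest) cur []
            = [cur.reverse] ++ PySem.Chars.split₀.go rest [] [] := by
          simp only [PySem.Chars.split₀.go, hsp, if_true, he, Bool.false_eq_true, if_false]
          rw [split_go_acc rest [] [cur.reverse]]
          simp
        rw [hgo, List.countP_append]
        by_cases h : feat5Chk (sufA cur.reverse)
        · rw [if_pos h]
          have h4 := ih [] (count + 1)
          rw [show sufA (([] : List Char).reverse) = ([] : List Char) from rfl] at h4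
          rw [h4]
          simp only [List.countP_cons, List.countP_nil, h, if_pos]
          push_cast
          ring
        · rw [if_neg h]
          have h4 := ih [] count
          rw [show sufA (([] : List Char).reverse) = ([] : List Char) from rfl] at h4
          rw [h4]
          simp only [List.countP_cons, List.countP_nil, h]
          push_cast
          ring
    · have hgo : PySem.Chars.split₀.go (c :: rest) cur []
          = PySem.Chars.split₀.go rest (c :: cur) [] := by
        simp [PySem.Chars.split₀.go, hsp]
      rw [hgo]
      cases hb : (c == '/') with
      | true =>
        have hstep : feat5Step (count, sufA cur.reverse) c = (count, []) := by
          simp [feat5Step, hsp, hb]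
        have hsufs : sufA ((c :: cur).reverse) = [] := by
          simp [List.reverse_cons, sufA_append, hb]
        rw [hstep]
        have h4 := ih (c :: cur) count
        rw [hsufs] at h4
        exact h4
      | false =>
        have hstep : feat5Step (count, sufA cur.reverse) c
            = (count, sufA cur.reverse ++ [c]) := by
          simp [feat5Step, hsp, hb]
        have hsufs : sufA ((c :: cur).reverse) = sufA cur.reverse ++ [c] := by
          simp [List.reverse_cons, sufA_append, hb]
        rw [hstep]
        have h4 := ih (c :: cur) count
        rw [hsufs] at h4
        exact h4

-- ===== VERDICT (by name: the statement is the Claim_ definition above) =====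
theorem feat5_spec : Claim_equal_feat5 := by
  intro tweet _
  unfold Spec_feat5
  have h1 : feat5 tweet
      = ((PySem.Chars.split₀ ((PySem.Str.lower tweet).toList)).map String.ofList).foldl aStep 0 :=
    rfl
  have h2 : feat5_alt tweet
      = (if feat5Chk (((PySem.Str.lower tweet).toList.foldl feat5Step (0, ([] : List Char))).2)
         then ((PySem.Str.lower tweet).toList.foldl feat5Step (0, ([] : List Char))).1 + 1
         else ((PySem.Str.lower tweet).toList.foldl feat5Step (0, ([] : List Char))).1) := rfl
  rw [h1, h2, foldA_eq_countP]
  have h3 := machine_eq_split ((PySem.Str.lower tweet).toList) [] 0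
  rw [show sufA (([] : List Char).reverse) = ([] : List Char) from rfl] at h3
  rw [h3]
  rfl
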